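-- pv_equiv track=rewrite | github.com/kov225/Projects | historical-nlp-reconciliation/src/engine.py | group_tokens_into_entities
-- ===== SOURCE A (Python) =====
-- from typing import Dict, Any, List, Tuple
--
-- def group_tokens_into_entities(tokens: List[str]) -> List[str]:
--     """Heuristic to group fragmented tokens into full person entities."""
--     entities = []
--     current_parts = []
--
--     skip_next = False
--     for t in tokens:
--         if not t: continue
--         if skip_next:
--             skip_next = False
--             continue
--
--         low = t.lower().strip()
--         if low == "of":
--             skip_next = True
--             continue
--
--         if low in ["husbandman", "yeoman", "clerk", "gent", "esq", "knight", "widow", "laborer", "spinster", "chapman"]: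
--             continue
--
--         if low.startswith("of ") or "together with" in low:
--             continue
--
--         current_parts.append(t.strip())
--         if len(current_parts) >= 2:
--             entities.append(f"{current_parts[1]} {current_parts[0]}")
--             current_parts = []
--
--     if current_parts:
--         entities.append(" ".join(current_parts))
--     return entities
-- ===== SOURCE B (Python) =====
-- TITLES = {"husbandman", "yeoman", "clerk", "gent", "esq", "knight", "widow",
--           "laborer", "spinster", "chapman"}
--
-- def _next_person_part(toks, i):
--     """Scan toks from position i for the next token naming part of a person;
--     return (stripped part, position after it) or None if none remains.
--     An 'of' connector swallows the following token; titles/descriptors,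
--     'of ...' phrases and 'together with' clauses are passed over."""
--     n = len(toks)
--     while i < n:
--         low = toks[i].lower().strip()
--         if low == "of":
--             i += 2
--         elif low in TITLES or low.startswith("of ") or "together with" in low:
--             i += 1
--         else:
--             return toks[i].strip(), i + 1
--     return None
--
-- def group_tokens_into_entities(tokens):
--     """Heuristic to group fragmented tokens into full person entities."""
--     # Pull name parts on demand, two per entity, emitting each entity as soon
--     # as it is complete; no skip flag, no buffer, no intermediate survivor list.
--     toks = [t for t in tokens if t]
--     entities = []
--     i = 0
--     while True:
--         first = _next_person_part(toks, i)
--         if first is None: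
--             return entities
--         a, i = first
--         second = _next_person_part(toks, i)
--         if second is None:
--             entities.append(a)
--             return entities
--         b, i = second
--         entities.append(f"{b} {a}")
-- ===== Notes on version B (the rewrite author's own statement) =====
-- stated objective: alternative
-- what changed: A's single stateful loop (skip_next flag plus a flush-at-2 buffer of current parts) is replaced by an on-demand scanner _next_person_part(toks, i) that returns the next name part and the position after it, with a driver that pulls two parts per entity and emits each entity immediately; there is no skip flag, no buffer and no intermediate survivor list.
import Mathlib
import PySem

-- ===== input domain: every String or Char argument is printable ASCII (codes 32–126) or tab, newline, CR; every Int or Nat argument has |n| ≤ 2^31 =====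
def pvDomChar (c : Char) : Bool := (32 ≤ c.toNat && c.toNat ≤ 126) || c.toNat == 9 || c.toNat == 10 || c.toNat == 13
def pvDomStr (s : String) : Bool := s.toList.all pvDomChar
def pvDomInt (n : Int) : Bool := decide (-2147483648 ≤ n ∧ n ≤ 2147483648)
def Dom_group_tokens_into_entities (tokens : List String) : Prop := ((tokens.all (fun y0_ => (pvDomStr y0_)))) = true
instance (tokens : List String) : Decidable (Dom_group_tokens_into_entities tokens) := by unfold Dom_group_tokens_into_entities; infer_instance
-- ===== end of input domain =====

-- B replaces A's single stateful loop (skip_next flag + flush-at-2 buffer) by an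
-- on-demand scanner that returns the next name part and the position after it, with a
-- driver pulling two parts per entity and emitting each entity as soon as it is
-- complete; objective: alternative.

-- ===== PORT A =====
def pvTitles : List String :=
  ["husbandman", "yeoman", "clerk", "gent", "esq", "knight", "widow", "laborer", "spinster", "chapman"]

-- A's loop, step for step: state = (entities, current_parts, skip_next).
-- f"{x} {y}" and " ".join are ported as PySem.Str.join " " (exact);
-- current_parts[1]/[0] are in range at the flush (length = 2 there), ported via pyGetD.
def pvGroupA : List String → List String → List String → Bool → List String
  | [], entities, current, _ =>
    if current.isEmpty then entities else entities ++ [PySem.Str.join " " current]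
  | t :: rest, entities, current, skip =>
    if t == "" then pvGroupA rest entities current skip
    else if skip then pvGroupA rest entities current false
    else
      let low := PySem.Str.strip (PySem.Str.lower t)
      if low == "of" then pvGroupA rest entities current true
      else if pvTitles.contains low then pvGroupA rest entities current skip
      else if PySem.Str.startswith low "of " || PySem.Str.isIn "together with" low then
        pvGroupA rest entities current skip
      else
        let current' := current ++ [PySem.Str.strip t]
        if 2 ≤ current'.length then
          pvGroupA rest
            (entities ++ [PySem.Str.join " " [PySem.List.pyGetD current' 1 "", PySem.List.pyGetD current' 0 ""]])
            [] skip
        else pvGroupA rest entities current' skip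

def group_tokens_into_entities (tokens : List String) : List String :=
  pvGroupA tokens [] [] false

-- ===== PORT B =====
-- B's scanner _next_person_part: the while loop over the index i, exact step for step;
-- toks[i] is in range under the loop guard i < n, ported as getD i "" there.
def pvNextPartIdx (ts : List String) (i : Nat) : Option (String × Nat) :=
  if i < ts.length then
    let low := PySem.Str.strip (PySem.Str.lower (ts.getD i ""))
    if low == "of" then pvNextPartIdx ts (i + 2)
    else if pvTitles.contains low || PySem.Str.startswith low "of " || PySem.Str.isIn "together with" low then
      pvNextPartIdx ts (i + 1)
    else some (PySem.Str.strip (ts.getD i ""), i + 1)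
  else none
  termination_by ts.length - i
  decreasing_by all_goals omega

-- scanner step equations (the four branches of the while loop), cited below
theorem pvNextPartIdx_stop (ts : List String) (i : Nat) (h : ¬ i < ts.length) :
    pvNextPartIdx ts i = none := by
  rw [pvNextPartIdx, if_neg h]

theorem pvNextPartIdx_of (ts : List String) (i : Nat) (hlt : i < ts.length)
    (hof : (PySem.Str.strip (PySem.Str.lower (ts.getD i "")) == "of") = true) :
    pvNextPartIdx ts i = pvNextPartIdx ts (i + 2) := by
  rw [pvNextPartIdx, if_pos hlt]
  simp only [hof, if_true]

theorem pvNextPartIdx_skip (ts : List String) (i : Nat) (hlt : i < ts.length)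
    (hof : ¬ (PySem.Str.strip (PySem.Str.lower (ts.getD i "")) == "of") = true)
    (hex : (pvTitles.contains (PySem.Str.strip (PySem.Str.lower (ts.getD i ""))) || PySem.Str.startswith (PySem.Str.strip (PySem.Str.lower (ts.getD i ""))) "of " || PySem.Str.isIn "together with" (PySem.Str.strip (PySem.Str.lower (ts.getD i "")))) = true) :
    pvNextPartIdx ts i = pvNextPartIdx ts (i + 1) := by
  rw [pvNextPartIdx, if_pos hlt]
  rw [if_neg hof, if_pos hex]

theorem pvNextPartIdx_take (ts : List String) (i : Nat) (hlt : i < ts.length)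
    (hof : ¬ (PySem.Str.strip (PySem.Str.lower (ts.getD i "")) == "of") = true)
    (hex : ¬ (pvTitles.contains (PySem.Str.strip (PySem.Str.lower (ts.getD i ""))) || PySem.Str.startswith (PySem.Str.strip (PySem.Str.lower (ts.getD i ""))) "of " || PySem.Str.isIn "together with" (PySem.Str.strip (PySem.Str.lower (ts.getD i "")))) = true) :
    pvNextPartIdx ts i = some (PySem.Str.strip (ts.getD i ""), i + 1) := by
  rw [pvNextPartIdx, if_pos hlt]
  rw [if_neg hof, if_neg hex]

-- the scanner moves strictly forward (used for the driver's termination)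
theorem pvNextPartIdx_bounds_aux : ∀ (n : Nat) (ts : List String) (i : Nat), ts.length - i ≤ n →
    ∀ (a : String) (j : Nat), pvNextPartIdx ts i = some (a, j) → i < j ∧ j ≤ ts.length := by
  intro n
  induction n with
  | zero =>
    intro ts i hn a j h
    rw [pvNextPartIdx_stop ts i (by omega)] at h
    exact absurd h (by simp)
  | succ n ih =>
    intro ts i hn a j h
    by_cases hlt : i < ts.length
    · by_cases hof : (PySem.Str.strip (PySem.Str.lower (ts.getD i "")) == "of") = true
      · rw [pvNextPartIdx_of ts i hlt hof] at h
        have := ih ts (i + 2) (by omega) a j h; omega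
      · by_cases hex : (pvTitles.contains (PySem.Str.strip (PySem.Str.lower (ts.getD i ""))) || PySem.Str.startswith (PySem.Str.strip (PySem.Str.lower (ts.getD i ""))) "of " || PySem.Str.isIn "together with" (PySem.Str.strip (PySem.Str.lower (ts.getD i "")))) = true
        · rw [pvNextPartIdx_skip ts i hlt hof hex] at h
          have := ih ts (i + 1) (by omega) a j h; omega
        · rw [pvNextPartIdx_take ts i hlt hof hex] at h
          simp at h; omega
    · rw [pvNextPartIdx_stop ts i hlt] at h
      exact absurd h (by simp)

theorem pvNextPartIdx_bounds (ts : List String) (i : Nat) (a : String) (j : Nat)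
    (h : pvNextPartIdx ts i = some (a, j)) : i < j ∧ j ≤ ts.length :=
  pvNextPartIdx_bounds_aux (ts.length - i) ts i le_rfl a j h

-- B's driver: the 'while True' loop pulling two parts per entity.
def pvDriveIdx (ts : List String) (i : Nat) : List String :=
  match h1 : pvNextPartIdx ts i with
  | none => []
  | some (a, j) =>
    match h2 : pvNextPartIdx ts j with
    | none => [a]
    | some (b, k) => PySem.Str.join " " [b, a] :: pvDriveIdx ts k
  termination_by ts.length - i
  decreasing_by
    have g1 := pvNextPartIdx_bounds ts i a j h1
    have g2 := pvNextPartIdx_bounds ts j b k h2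
    omega

def group_tokens_into_entities_alt (tokens : List String) : List String :=
  pvDriveIdx (tokens.filter (fun t => !(t == ""))) 0

-- ===== PRECONDITION & SPEC =====
def Spec_group_tokens_into_entities (tokens : List String) (out : List String) : Prop := out = group_tokens_into_entities_alt tokens
instance (tokens : List String) (out : List String) : Decidable (Spec_group_tokens_into_entities tokens out) := by unfold Spec_group_tokens_into_entities; infer_instance

-- ===== CLAIM (what is proved, stated in full; the proofs are below) =====
def Claim_equal_group_tokens_into_entities : Prop := ∀ (tokens : List String), Dom_group_tokens_into_entities tokens → Spec_group_tokens_into_entities tokens (group_tokens_into_entities tokens)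

-- ===== LEMMAS AND PROOFS =====

-- proof-side: the full list of survivors of an empty-free token list
def pvCol : List String → List String
  | [] => []
  | t :: rest =>
    let low := PySem.Str.strip (PySem.Str.lower t)
    if low == "of" then pvCol (rest.drop 1)
    else if pvTitles.contains low || PySem.Str.startswith low "of " || PySem.Str.isIn "together with" low then
      pvCol rest
    else PySem.Str.strip t :: pvCol rest
  termination_by ts => ts.length
  decreasing_by all_goals (simp; try omega)

-- proof-side mirror of A's survivor collection (A's loop without the pairing buffer)
def pvColA : List String → Bool → List String
  | [], _ => []
  | t :: rest, skip =>
    if t == "" then pvColA rest skip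
    else if skip then pvColA rest false
    else
      let low := PySem.Str.strip (PySem.Str.lower t)
      if low == "of" then pvColA rest true
      else if pvTitles.contains low then pvColA rest skip
      else if PySem.Str.startswith low "of " || PySem.Str.isIn "together with" low then pvColA rest skip
      else PySem.Str.strip t :: pvColA rest skip

-- proof-side pairing of a survivor list, two at a time
def pvPair : List String → List String
  | [] => []
  | [a] => [a]
  | a :: b :: rest => PySem.Str.join " " [b, a] :: pvPair rest

theorem pvJoinSingle (a : String) : PySem.Str.join " " [a] = a := by
  simp [PySem.Str.join, PySem.Chars.join, List.intercalate]

-- A's loop = its collected survivors, paired two at a time (invariant on the buffer)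
theorem pvGroupA_eq_pair (ts : List String) :
    ∀ (entities current : List String) (skip : Bool), current.length ≤ 1 →
      pvGroupA ts entities current skip = entities ++ pvPair (current ++ pvColA ts skip) := by
  induction ts with
  | nil =>
    intro entities current skip h
    match current, h with
    | [], _ => simp [pvGroupA, pvColA, pvPair]
    | [a], _ => simp [pvGroupA, pvColA, pvPair, pvJoinSingle]
  | cons t rest ih =>
    intro entities current skip h
    simp only [pvGroupA, pvColA]
    split_ifs with h0 h1 h2 h3 h4 h5
    · exact ih entities current skip h
    · exact ih entities current false h
    · exact ih entities current true h
    · exact ih entities current skip h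
    · exact ih entities current skip h
    · match current, h with
      | [a], _ =>
        rw [ih (entities ++ [PySem.Str.join " " [PySem.List.pyGetD ([a] ++ [PySem.Str.strip t]) 1 "", PySem.List.pyGetD ([a] ++ [PySem.Str.strip t]) 0 ""]]) [] skip (by simp)]
        simp [pvPair, PySem.List.pyGetD, PySem.List.pyGet?, PySem.List.pyIdx?]
      | [], _ => simp at h5
    · match current, h with
      | [], _ =>
        rw [ih entities ([] ++ [PySem.Str.strip t]) skip (by simp)]
        simp
      | [a], _ => simp at h5

-- A's survivor collection = the survivors of the empty-filtered tokens
-- (skip_next pending = the filtered remainder with its head dropped)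
theorem pvColA_eq (ts : List String) :
    pvColA ts false = pvCol (ts.filter (fun t => !(t == ""))) ∧
    pvColA ts true = pvCol ((ts.filter (fun t => !(t == ""))).drop 1) := by
  induction ts with
  | nil => simp [pvColA, pvCol]
  | cons t rest ih =>
    by_cases h0 : t == ""
    · simpa [pvColA, List.filter, h0] using ih
    · refine ⟨?_, ?_⟩
      · rw [List.filter_cons_of_pos (by simp [h0])]
        simp only [pvColA, pvCol]
        split_ifs <;>
          first
            | exact (by assumption : False).elim
            | exact ih.1
            | exact ih.2
            | (rw [ih.1]; done)
            | simp_all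
      · simp only [pvColA]
        rw [List.filter_cons_of_pos (by simp [h0]), List.drop_one, List.tail_cons]
        split_ifs
        first | exact (by assumption : False).elim | exact ih.1

-- B's scanner vs the survivor list of the suffix at its index: it produces exactly
-- the suffix's first survivor, and the remainder holds exactly the rest
theorem pvNextPartIdx_col_aux : ∀ (n : Nat) (ts : List String) (i : Nat), ts.length - i ≤ n →
    (pvNextPartIdx ts i = none → pvCol (ts.drop i) = []) ∧
    (∀ (a : String) (j : Nat), pvNextPartIdx ts i = some (a, j) →
      pvCol (ts.drop i) = a :: pvCol (ts.drop j)) := by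
  intro n
  induction n with
  | zero =>
    intro ts i hn
    rw [pvNextPartIdx_stop ts i (by omega), List.drop_eq_nil_of_le (by omega)]
    exact ⟨fun _ => by rw [pvCol], fun a j h => absurd h (by simp)⟩
  | succ n ih =>
    intro ts i hn
    by_cases hlt : i < ts.length
    · have hdrop : ts.drop i = ts[i] :: ts.drop (i + 1) := List.drop_eq_getElem_cons hlt
      have hget : ts.getD i "" = ts[i] := List.getD_eq_getElem ts "" hlt
      by_cases hof : (PySem.Str.strip (PySem.Str.lower (ts.getD i "")) == "of") = true
      · have hof' := hof; rw [hget] at hof'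
        have hdd : (ts.drop (i + 1)).drop 1 = ts.drop (i + 2) := by
          rw [List.drop_drop]
        rw [pvNextPartIdx_of ts i hlt hof, hdrop, pvCol, if_pos hof', hdd]
        exact ih ts (i + 2) (by omega)
      · by_cases hex : (pvTitles.contains (PySem.Str.strip (PySem.Str.lower (ts.getD i ""))) || PySem.Str.startswith (PySem.Str.strip (PySem.Str.lower (ts.getD i ""))) "of " || PySem.Str.isIn "together with" (PySem.Str.strip (PySem.Str.lower (ts.getD i "")))) = true
        · have hof' := hof; rw [hget] at hof'
          have hex' := hex; rw [hget] at hex'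
          rw [pvNextPartIdx_skip ts i hlt hof hex, hdrop, pvCol, if_neg hof', if_pos hex']
          exact ih ts (i + 1) (by omega)
        · have hof' := hof; rw [hget] at hof'
          have hex' := hex; rw [hget] at hex'
          rw [pvNextPartIdx_take ts i hlt hof hex, hdrop, pvCol, if_neg hof', if_neg hex', hget]
          refine ⟨fun h => absurd h (by simp), fun a j h => ?_⟩
          simp only [Option.some.injEq, Prod.mk.injEq] at h
          rw [← h.1, ← h.2]
    · rw [pvNextPartIdx_stop ts i hlt, List.drop_eq_nil_of_le (by omega)]
      exact ⟨fun _ => by rw [pvCol], fun a j h => absurd h (by simp)⟩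

theorem pvNextPartIdx_none (ts : List String) (i : Nat) (h : pvNextPartIdx ts i = none) :
    pvCol (ts.drop i) = [] :=
  (pvNextPartIdx_col_aux (ts.length - i) ts i le_rfl).1 h

theorem pvNextPartIdx_some (ts : List String) (i : Nat) (a : String) (j : Nat)
    (h : pvNextPartIdx ts i = some (a, j)) : pvCol (ts.drop i) = a :: pvCol (ts.drop j) :=
  (pvNextPartIdx_col_aux (ts.length - i) ts i le_rfl).2 a j h

-- B's driver = pairing the survivors of the suffix at its index
theorem pvDriveIdx_pair_aux : ∀ (n : Nat) (ts : List String) (i : Nat), ts.length - i ≤ n →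
    pvDriveIdx ts i = pvPair (pvCol (ts.drop i)) := by
  intro n
  induction n with
  | zero =>
    intro ts i hn
    rw [pvDriveIdx]
    split
    · next h1 => rw [pvNextPartIdx_none ts i h1, pvPair]
    · next a j h1 => have := pvNextPartIdx_bounds ts i a j h1; omega
  | succ n ih =>
    intro ts i hn
    rw [pvDriveIdx]
    split
    · next h1 => rw [pvNextPartIdx_none ts i h1, pvPair]
    · next a j h1 =>
      rw [pvNextPartIdx_some ts i a j h1]
      split
      · next h2 => rw [pvNextPartIdx_none ts j h2, pvPair]
      · next b k h2 =>
        rw [pvNextPartIdx_some ts j b k h2, pvPair]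
        have g1 := pvNextPartIdx_bounds ts i a j h1
        have g2 := pvNextPartIdx_bounds ts j b k h2
        rw [ih ts k (by omega)]

-- ===== VERDICT (by name: the statement is the Claim_ definition above) =====
theorem group_tokens_into_entities_spec : Claim_equal_group_tokens_into_entities := by
  intro tokens _
  show group_tokens_into_entities tokens = group_tokens_into_entities_alt tokens
  unfold group_tokens_into_entities group_tokens_into_entities_alt
  rw [pvGroupA_eq_pair tokens [] [] false (by simp), (pvColA_eq tokens).1,
    pvDriveIdx_pair_aux ((tokens.filter (fun t => !(t == ""))).length) _ 0 (by omega)]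
  simp
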